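-- pv_equiv track=rewrite | github.com/lorenzooaureli/sanger-qc-blast | sanger_qc_trim/trim.py | trim_ends
-- ===== SOURCE A (Python) =====
-- from typing import Tuple
--
-- def trim_ends(quals: list[int], threshold: int) -> Tuple[int, int]:
--     """
--     Hard clip from 5' and 3' ends to first/last base with Q >= threshold.
--
--     Returns 0-based [start, end) indices. Returns (0, 0) if no bases meet threshold.
--
--     Args:
--         quals: List of phred quality scores
--         threshold: Quality threshold (T)
--
--     Returns:
--         Tuple of (trim_start, trim_end) as 0-based [start, end) indices
--
--     Example:
--         >>> trim_ends([15, 25, 25, 15], 20)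
--         (1, 3)
--     """
--     if not quals:
--         return (0, 0)
--
--     n = len(quals)
--
--     # Find first base with Q >= threshold
--     start = next((i for i, q in enumerate(quals) if q >= threshold), n)
--
--     # Find last base with Q >= threshold
--     end = next((i for i in range(n - 1, -1, -1) if quals[i] >= threshold), -1)
--
--     # Check if valid range found
--     if start >= n or end < 0 or end < start:
--         return (0, 0)
--
--     return (start, end + 1)  # Convert to [start, end) format
-- ===== SOURCE B (Python) =====
-- from typing import Tuple
--
-- def trim_ends(quals: list[int], threshold: int) -> Tuple[int, int]:
--     """Single forward pass: track first and last qualifying index together."""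
--     start = None
--     end = 0
--     for i, q in enumerate(quals):
--         if q >= threshold:
--             if start is None:
--                 start = i
--             end = i
--     if start is None:
--         return (0, 0)
--     return (start, end + 1)
-- ===== Notes on version B (the rewrite author's own statement) =====
-- stated objective: simpler
-- what changed: Replaces A's two separate scans (a forward scan for the first qualifying index and a backward indexed scan for the last) plus a three-way validity guard by one forward pass that maintains first/last qualifying indices together, with a single None check at the end.
import Mathlib
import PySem

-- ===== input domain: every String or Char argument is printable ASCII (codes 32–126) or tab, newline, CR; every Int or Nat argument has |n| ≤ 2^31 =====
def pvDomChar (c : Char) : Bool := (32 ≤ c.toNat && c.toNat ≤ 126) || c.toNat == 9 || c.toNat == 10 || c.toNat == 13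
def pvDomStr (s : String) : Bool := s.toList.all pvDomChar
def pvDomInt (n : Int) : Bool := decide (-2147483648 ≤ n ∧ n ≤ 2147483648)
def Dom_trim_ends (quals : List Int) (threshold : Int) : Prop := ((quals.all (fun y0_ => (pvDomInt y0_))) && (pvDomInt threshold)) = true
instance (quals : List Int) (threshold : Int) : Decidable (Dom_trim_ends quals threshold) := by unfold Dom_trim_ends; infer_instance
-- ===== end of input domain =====

-- B replaces A's two separate scans (forward for first, backward for last) by one
-- forward pass maintaining first/last qualifying indices together: simpler.

-- ===== PORT A =====
-- next((i for i, q in enumerate(quals) if q >= threshold), n): counter starts at 0,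
-- so on exhaustion the counter equals n, the default.
def pvAFirst (threshold : Int) (i : Int) : List Int → Int
  | [] => i
  | q :: rest => if q ≥ threshold then i else pvAFirst threshold (i + 1) rest

-- next((i for i in range(n-1,-1,-1) if quals[i] >= threshold), -1): the descending
-- index scan visits exactly quals.reverse front-to-back with the index counting
-- down from n-1 (exact: quals[n-1-j] = quals.reverse[j]).
def pvALast (threshold : Int) (i : Int) : List Int → Int
  | [] => -1
  | q :: rest => if q ≥ threshold then i else pvALast threshold (i - 1) rest

def trim_ends (quals : List Int) (threshold : Int) : Int × Int :=
  if quals = [] then (0, 0)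
  else
    let n : Int := quals.length
    let start := pvAFirst threshold 0 quals
    let e := pvALast threshold (n - 1) quals.reverse
    if start ≥ n ∨ e < 0 ∨ e < start then (0, 0)
    else (start, e + 1)

-- ===== PORT B =====
-- the for i, q in enumerate(quals) loop with state (start : Option, end : Int)
def pvBLoop (threshold : Int) : List Int → Int → Option Int × Int → Option Int × Int
  | [], _, st => st
  | q :: rest, i, (start, e) =>
    if q ≥ threshold then
      pvBLoop threshold rest (i + 1) (some (start.getD i), i)
    else
      pvBLoop threshold rest (i + 1) (start, e)

def trim_ends_alt (quals : List Int) (threshold : Int) : Int × Int :=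
  match pvBLoop threshold quals 0 (none, 0) with
  | (none, _) => (0, 0)
  | (some s, e) => (s, e + 1)

-- ===== PRECONDITION & SPEC =====
def Spec_trim_ends (quals : List Int) (threshold : Int) (out : Int × Int) : Prop := out = trim_ends_alt quals threshold
instance (quals : List Int) (threshold : Int) (out : Int × Int) : Decidable (Spec_trim_ends quals threshold out) := by unfold Spec_trim_ends; infer_instance

-- ===== CLAIM (what is proved, stated in full; the proofs are below) =====
def Claim_equal_trim_ends : Prop := ∀ (quals : List Int) (threshold : Int), Dom_trim_ends quals threshold → Spec_trim_ends quals threshold (trim_ends quals threshold)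

-- ===== LEMMAS AND PROOFS =====

-- the predicate both programs test
def pvP (t : Int) : Int → Bool := fun q => decide (t ≤ q)

-- index of the last qualifying element (meaningful when l.any (pvP t))
def pvLastIdx (t : Int) (l : List Int) : Int :=
  (l.length : Int) - 1 - (l.reverse.findIdx (pvP t) : Int)

theorem pvAFirst_eq (t : Int) (l : List Int) : ∀ i : Int,
    pvAFirst t i l = i + (l.findIdx (pvP t) : Int) := by
  induction l with
  | nil => intro i; simp [pvAFirst]
  | cons q rest ih =>
    intro i
    by_cases hq : q ≥ t
    · simp [pvAFirst, hq, List.findIdx_cons, pvP]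
    · simp only [pvAFirst, if_neg hq, ih, List.findIdx_cons]
      have : pvP t q = false := by simp [pvP]; omega
      simp [this]; ring

theorem pvALast_eq (t : Int) (l : List Int) : ∀ i : Int,
    pvALast t i l = if l.any (pvP t) then i - (l.findIdx (pvP t) : Int) else -1 := by
  induction l with
  | nil => intro i; simp [pvALast]
  | cons q rest ih =>
    intro i
    by_cases hq : q ≥ t
    · have : pvP t q = true := by simp [pvP]; omega
      simp [pvALast, hq, List.findIdx_cons, this]
    · have hpq : pvP t q = false := by simp [pvP]; omega
      simp only [pvALast, if_neg hq, ih, List.any_cons, hpq, Bool.false_or,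
        List.findIdx_cons]
      by_cases ha : rest.any (pvP t)
      · simp [ha]; ring
      · simp [ha]

theorem pvLastIdx_cons_any (t q : Int) (rest : List Int)
    (ha : rest.any (pvP t) = true) :
    pvLastIdx t (q :: rest) = 1 + pvLastIdx t rest := by
  have hlt : rest.reverse.findIdx (pvP t) < rest.reverse.length := by
    rw [List.findIdx_lt_length]
    rcases List.any_eq_true.mp ha with ⟨x, hx, hpx⟩
    exact ⟨x, List.mem_reverse.mpr hx, hpx⟩
  unfold pvLastIdx
  rw [List.reverse_cons, List.findIdx_append]
  simp only [List.length_reverse] at hlt ⊢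
  rw [if_pos hlt]
  simp; omega

theorem pvLastIdx_cons_pos (t q : Int) (rest : List Int)
    (hq : pvP t q = true) (ha : rest.any (pvP t) = false) :
    pvLastIdx t (q :: rest) = 0 := by
  have heq : rest.reverse.findIdx (pvP t) = rest.reverse.length := by
    rw [List.findIdx_eq_length]
    intro x hx
    have := List.any_eq_false.mp (by simpa using ha) x (List.mem_reverse.mp hx)
    simpa using this
  unfold pvLastIdx
  rw [List.reverse_cons, List.findIdx_append]
  simp only [List.length_reverse] at heq ⊢
  rw [if_neg (by omega)]
  simp [List.findIdx_cons, hq]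

theorem pvBLoop_some (t : Int) (l : List Int) : ∀ (i s e : Int),
    pvBLoop t l i (some s, e) =
      (some s, if l.any (pvP t) then i + pvLastIdx t l else e) := by
  induction l with
  | nil => intro i s e; simp [pvBLoop]
  | cons q rest ih =>
    intro i s e
    by_cases hq : q ≥ t
    · have hpq : pvP t q = true := by simp [pvP]; omega
      simp only [pvBLoop, if_pos hq, Option.getD_some, ih, List.any_cons, hpq,
        Bool.true_or, if_pos]
      by_cases ha : rest.any (pvP t)
      · rw [if_pos ha, pvLastIdx_cons_any t q rest ha]; ring_nf
      · rw [if_neg ha, pvLastIdx_cons_pos t q rest hpq (by simpa using ha)]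
        simp
    · have hpq : pvP t q = false := by simp [pvP]; omega
      simp only [pvBLoop, if_neg hq, ih, List.any_cons, hpq, Bool.false_or]
      by_cases ha : rest.any (pvP t)
      · rw [if_pos ha, if_pos ha, pvLastIdx_cons_any t q rest ha]; ring_nf
      · rw [if_neg ha, if_neg ha]

theorem pvBLoop_none (t : Int) (l : List Int) : ∀ (i e : Int),
    pvBLoop t l i (none, e) =
      if l.any (pvP t) then
        (some (i + (l.findIdx (pvP t) : Int)), i + pvLastIdx t l)
      else (none, e) := by
  induction l with
  | nil => intro i e; simp [pvBLoop]
  | cons q rest ih =>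
    intro i e
    by_cases hq : q ≥ t
    · have hpq : pvP t q = true := by simp [pvP]; omega
      simp only [pvBLoop, if_pos hq, Option.getD_none, pvBLoop_some,
        List.any_cons, hpq, Bool.true_or, if_pos, List.findIdx_cons]
      by_cases ha : rest.any (pvP t)
      · rw [if_pos ha, pvLastIdx_cons_any t q rest ha]; simp; ring_nf
      · rw [if_neg ha, pvLastIdx_cons_pos t q rest hpq (by simpa using ha)]
        simp
    · have hpq : pvP t q = false := by simp [pvP]; omega
      simp only [pvBLoop, if_neg hq, ih, List.any_cons, hpq, Bool.false_or,
        List.findIdx_cons]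
      by_cases ha : rest.any (pvP t)
      · rw [if_pos ha, if_pos ha, pvLastIdx_cons_any t q rest ha]
        simp; constructor <;> ring
      · rw [if_neg ha, if_neg ha]

-- first qualifying index ≤ last qualifying index
theorem pvFirst_le_last (t : Int) (l : List Int) (ha : l.any (pvP t) = true) :
    (l.findIdx (pvP t) : Int) ≤ pvLastIdx t l := by
  rcases List.any_eq_true.mp ha with ⟨x, hx, hpx⟩
  have hr : l.reverse.findIdx (pvP t) < l.reverse.length := by
    rw [List.findIdx_lt_length]
    exact ⟨x, List.mem_reverse.mpr hx, hpx⟩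
  set r := l.reverse.findIdx (pvP t) with hrdef
  have hrl : r < l.length := by simpa using hr
  have hget : pvP t (l.reverse[r]'hr) = true := List.findIdx_getElem
  have hrev : l.reverse[r]'hr = l[l.length - 1 - r]'(by omega) := by
    rw [List.getElem_reverse]
  rw [hrev] at hget
  have hfind : l.findIdx (pvP t) ≤ l.length - 1 - r := by
    by_contra hcon
    push Not at hcon
    have := List.not_of_lt_findIdx (xs := l) (i := l.length - 1 - r) hcon
    exact absurd hget (by simp; exact this)
  unfold pvLastIdx
  omega

-- ===== VERDICT (by name: the statement is the Claim_ definition above) =====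
theorem trim_ends_spec : Claim_equal_trim_ends := by
  intro quals t _
  unfold Spec_trim_ends trim_ends trim_ends_alt
  by_cases hnil : quals = []
  · simp [hnil, pvBLoop]
  · rw [if_neg hnil]
    simp only [pvAFirst_eq, pvALast_eq, pvBLoop_none]
    have hrevany : quals.reverse.any (pvP t) = quals.any (pvP t) := by simp
    by_cases ha : quals.any (pvP t)
    · have hfl : quals.findIdx (pvP t) < quals.length := by
        rw [List.findIdx_lt_length]; exact List.any_eq_true.mp ha
      have hrl : quals.reverse.findIdx (pvP t) < quals.length := by
        have : quals.reverse.findIdx (pvP t) < quals.reverse.length := by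
          rw [List.findIdx_lt_length]
          rcases List.any_eq_true.mp ha with ⟨x, hx, hpx⟩
          exact ⟨x, List.mem_reverse.mpr hx, hpx⟩
        simpa using this
      have hle := pvFirst_le_last t quals ha
      rw [hrevany, if_pos ha, if_pos ha]
      have hguard : ¬ ((0 : Int) + (quals.findIdx (pvP t) : Int) ≥ (quals.length : Int) ∨
          (quals.length : Int) - 1 - (quals.reverse.findIdx (pvP t) : Int) < 0 ∨
          (quals.length : Int) - 1 - (quals.reverse.findIdx (pvP t) : Int) <
            0 + (quals.findIdx (pvP t) : Int)) := by
        unfold pvLastIdx at hle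
        push Not
        refine ⟨by omega, by omega, by omega⟩
      rw [if_neg hguard]
      unfold pvLastIdx
      simp
    · have hfeq : quals.findIdx (pvP t) = quals.length :=
        List.findIdx_eq_length.mpr
        (fun x hx => by simpa using List.any_eq_false.mp (by simpa using ha) x hx)
      rw [hrevany, if_neg ha, if_neg ha]
      rw [if_pos]
      left
      rw [hfeq]
      omega
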